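-- pv_equiv track=rewrite | github.com/joaopbicalho/CodingInPython | Gaussian_Elimination/Gaussian_Elimination.py | get_row_to_swap
-- ===== SOURCE A (Python) =====
-- def get_lead_ind(row):
--     for i in range(len(row)):
--         if row[i] != 0:
--             return i
--     return len(row)
--
-- def get_row_to_swap(M, start_i):
--     index = get_lead_ind(M[start_i])
--     rows = []
--     for i in range(len(M) - (start_i + 1)):
--         cur_lead_ind = get_lead_ind(M[i + start_i + 1])
--         if cur_lead_ind < index:
--             rows.append([i + start_i + 1, cur_lead_ind])
--     if(rows == []):
--         return start_i
--
--     low = len(M[0])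
--     index = 0
--     for k in range(len(rows)):
--         if rows[k][1] < low:
--             low = rows[k][1]
--             index = k
--
--     return rows[index][0]
-- ===== SOURCE B (Python) =====
-- def get_lead_ind(row):
--     return next((j for j, x in enumerate(row) if x != 0), len(row))
--
-- def get_row_to_swap(M, start_i):
--     best_row = start_i
--     best_lead = get_lead_ind(M[start_i])
--     for i in range(start_i + 1, len(M)):
--         l = get_lead_ind(M[i])
--         if l < best_lead:
--             best_row, best_lead = i, l
--     return best_row
-- ===== Notes on version B (the rewrite author's own statement) =====
-- stated objective: simpler
-- what changed: B replaces A's two-phase structure (build a list of candidate [row, lead] pairs, then a second scan over that list to pick the minimum) with one direct first-argmin pass over the rows below start_i, maintaining only best_row/best_lead and no intermediate table.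
-- outside the precondition, e.g. on get_row_to_swap([[0], [0, 0, 0, 0], [0, 0], [0, 1]], 1): A returns 2, B returns 3
import Mathlib
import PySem

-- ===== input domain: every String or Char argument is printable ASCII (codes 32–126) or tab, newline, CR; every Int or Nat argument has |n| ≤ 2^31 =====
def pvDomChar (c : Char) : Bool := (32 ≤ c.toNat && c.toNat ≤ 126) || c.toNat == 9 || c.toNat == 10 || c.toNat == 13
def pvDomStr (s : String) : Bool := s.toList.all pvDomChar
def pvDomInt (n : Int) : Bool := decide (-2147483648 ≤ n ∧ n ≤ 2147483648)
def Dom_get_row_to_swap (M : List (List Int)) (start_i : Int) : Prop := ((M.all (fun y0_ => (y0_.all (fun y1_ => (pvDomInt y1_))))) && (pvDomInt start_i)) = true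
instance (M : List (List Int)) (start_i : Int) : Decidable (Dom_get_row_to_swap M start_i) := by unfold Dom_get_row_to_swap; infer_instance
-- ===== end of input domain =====

-- B replaces A's two-phase build-candidate-list-then-scan with a single first-argmin pass (simpler; return value only, no mutation).

-- ===== PORT A =====
-- for i in range(len(row)): if row[i] != 0: return i; return len(row)
def get_lead_ind_go : List Int → Int → Int
  | [], i => i
  | x :: xs, i => if x ≠ 0 then i else get_lead_ind_go xs (i + 1)

def get_lead_ind (row : List Int) : Int := get_lead_ind_go row 0

def get_row_to_swap (M : List (List Int)) (start_i : Int) : Int :=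
  let index := get_lead_ind (PySem.List.pyGetD M start_i [])
  let rows : List (Int × Int) :=
    (PySem.List.pyRange 0 ((M.length : Int) - (start_i + 1)) 1).foldl
      (fun rows i =>
        let cur_lead_ind := get_lead_ind (PySem.List.pyGetD M (i + start_i + 1) [])
        if cur_lead_ind < index then rows ++ [(i + start_i + 1, cur_lead_ind)] else rows) []
  if rows = [] then start_i
  else
    let st :=
      (PySem.List.pyRange 0 (rows.length : Int) 1).foldl
        (fun (st : Int × Int) k =>
          let r := PySem.List.pyGetD rows k (0, 0)
          if r.2 < st.1 then (r.2, k) else st)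
        (((PySem.List.pyGetD M 0 []).length : Int), 0)
    (PySem.List.pyGetD rows st.2 (0, 0)).1

-- ===== PORT B =====
-- next((j for j, x in enumerate(row) if x != 0), len(row))
def lead_index (row : List Int) : Int :=
  match row.findIdx? (fun x => x ≠ 0) with
  | some j => (j : Int)
  | none => (row.length : Int)

def get_row_to_swap_alt (M : List (List Int)) (start_i : Int) : Int :=
  let best :=
    (PySem.List.pyRange (start_i + 1) (M.length : Int) 1).foldl
      (fun (best : Int × Int) i =>
        let l := lead_index (PySem.List.pyGetD M i [])
        if l < best.2 then (i, l) else best)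
      (start_i, lead_index (PySem.List.pyGetD M start_i []))
  best.1

-- ===== PRECONDITION & SPEC =====
-- Pre_ excludes start_i for which M[start_i] raises IndexError, and inputs whose start row is
-- longer than row 0, on which A's tie-break against len(M[0]) in its final scan is an
-- implementation artefact.
def Pre_get_row_to_swap (M : List (List Int)) (start_i : Int) : Prop :=
  PySem.Raise.InRange M.length start_i ∧
    (PySem.List.pyGetD M start_i []).length ≤ (M.headD []).length
instance (M : List (List Int)) (start_i : Int) : Decidable (Pre_get_row_to_swap M start_i) := by
  unfold Pre_get_row_to_swap; infer_instance
def pvWitness_get_row_to_swap : List (List Int) × Int := ([[0, 0, 3], [1, 2, 0], [0, 5, 0]], 0)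

def Spec_get_row_to_swap (M : List (List Int)) (start_i : Int) (out : Int) : Prop := out = get_row_to_swap_alt M start_i
instance (M : List (List Int)) (start_i : Int) (out : Int) : Decidable (Spec_get_row_to_swap M start_i out) := by unfold Spec_get_row_to_swap; infer_instance

-- ===== CLAIM (what is proved, stated in full; the proofs are below) =====
def Claim_equal_get_row_to_swap : Prop := ∀ (M : List (List Int)) (start_i : Int), Dom_get_row_to_swap M start_i → Pre_get_row_to_swap M start_i → Spec_get_row_to_swap M start_i (get_row_to_swap M start_i)

-- ===== LEMMAS AND PROOFS =====

-- the common argmin step both programs reduce to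
def pvStep (b : Int × Int) (x : Int × Int) : Int × Int := if x.2 < b.2 then x else b

lemma lead_index_cons (x : Int) (xs : List Int) :
    lead_index (x :: xs) = if x = 0 then 1 + lead_index xs else 0 := by
  unfold lead_index
  rw [List.findIdx?_cons]
  by_cases hx : x = 0
  · have hd : (decide ¬ x = 0) = false := by simp [hx]
    rw [hd, if_pos hx]
    simp only [Bool.false_eq_true, if_false, ite_false]
    cases h : xs.findIdx? (fun y => decide ¬ y = 0) <;>
      simp only [h, Option.map_none, Option.map_some] <;> push_cast <;> ring_nf <;>
      simp [List.length_cons] <;> ring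
  · have hd : (decide ¬ x = 0) = true := by simp [hx]
    rw [hd, if_neg hx]
    simp

lemma get_lead_ind_go_eq (row : List Int) : ∀ i : Int, get_lead_ind_go row i = i + lead_index row := by
  induction row with
  | nil => intro i; simp [get_lead_ind_go, lead_index]
  | cons x xs ih =>
    intro i
    by_cases hx : x = 0
    · simp [get_lead_ind_go, lead_index_cons, hx, ih]; ring
    · simp [get_lead_ind_go, lead_index_cons, hx]

lemma get_lead_ind_eq (row : List Int) : get_lead_ind row = lead_index row := by
  simpa using get_lead_ind_go_eq row 0

lemma lead_index_le (row : List Int) : lead_index row ≤ (row.length : Int) := by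
  unfold lead_index
  cases h : row.findIdx? (fun x => decide ¬ x = 0) with
  | none => simp
  | some j =>
    have hj := (List.findIdx?_eq_some_iff_findIdx_eq.mp h).1
    simp only [h]
    exact_mod_cast hj.le

-- absorption: with a fixed threshold at least the running best, elements failing it never update
lemma foldl_step_filter (t : Int) : ∀ (ps : List (Int × Int)) (b : Int × Int), b.2 ≤ t →
    ps.foldl pvStep b = (ps.filter (fun x => x.2 < t)).foldl pvStep b := by
  intro ps
  induction ps with
  | nil => intro b _; rfl
  | cons x xs ih =>
    intro b hb
    by_cases hx : x.2 < t
    · have h2 : (pvStep b x).2 ≤ t := by unfold pvStep; split <;> omega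
      have hd : decide (x.2 < t) = true := by simp [hx]
      simp only [List.foldl_cons, List.filter_cons, hd, ite_true, if_pos]
      exact ih _ h2
    · have hstep : pvStep b x = b := by unfold pvStep; rw [if_neg]; omega
      have hd : decide (x.2 < t) = false := by simp [hx]
      simp only [List.foldl_cons, List.filter_cons, hd, Bool.false_eq_true, ite_false, if_neg, hstep]
      exact ih _ hb

-- invariant of A's index-tracking scan: the state (low, idx) mirrors the running best of pvStep
lemma scan_inv (d : Int × Int) : ∀ (tl pre : List (Int × Int)) (j : Int) (b : Int × Int),
    0 ≤ j → PySem.List.pyGetD (pre ++ tl) j d = b →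
    0 ≤ ((PySem.List.enumerate tl (pre.length : Int)).foldl
        (fun (st : Int × Int) p => if p.2.2 < st.1 then (p.2.2, p.1) else st) (b.2, j)).2 ∧
    PySem.List.pyGetD (pre ++ tl)
        (((PySem.List.enumerate tl (pre.length : Int)).foldl
          (fun (st : Int × Int) p => if p.2.2 < st.1 then (p.2.2, p.1) else st) (b.2, j)).2) d
      = tl.foldl pvStep b ∧
    ((PySem.List.enumerate tl (pre.length : Int)).foldl
        (fun (st : Int × Int) p => if p.2.2 < st.1 then (p.2.2, p.1) else st) (b.2, j)).1
      = (tl.foldl pvStep b).2 := by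
  intro tl
  induction tl with
  | nil =>
    intro pre j b hj hb
    rw [List.append_nil] at hb
    simp only [PySem.List.enumerate_nil, List.foldl_nil, List.append_nil]
    exact ⟨hj, hb, trivial⟩
  | cons x xs ih =>
    intro pre j b hj hb
    rw [PySem.List.enumerate_cons]
    simp only [List.foldl_cons]
    have hl : ((pre ++ [x]).length : Int) = (pre.length : Int) + 1 := by
      simp [List.length_append]
    by_cases hx : x.2 < b.2
    · have hstep : pvStep b x = x := by unfold pvStep; rw [if_pos hx]
      have hlen2 : (pre.length : Int) < (((pre ++ [x]) ++ xs).length : Int) := by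
        simp [List.length_append]
      have hget : PySem.List.pyGetD ((pre ++ [x]) ++ xs) (pre.length : Int) d = x := by
        rw [PySem.List.pyGetD_eq_getElem _ d (Int.natCast_nonneg _) hlen2]
        simp [List.getElem_append]
      have hres := ih (pre ++ [x]) (pre.length : Int) x (Int.natCast_nonneg _) hget
      rw [if_pos hx, hstep, List.append_cons, ← hl]
      exact hres
    · have hstep : pvStep b x = b := by unfold pvStep; rw [if_neg hx]
      have hget : PySem.List.pyGetD ((pre ++ [x]) ++ xs) j d = b := by
        rw [← List.append_cons]; exact hb
      have hres := ih (pre ++ [x]) j b hj hget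
      rw [if_neg hx, hstep, List.append_cons, ← hl]
      exact hres

-- A's second loop (indexing rows[k] over range(len(rows))) as a fold over the enumerated list
lemma scan_to_enumerate (rows : List (Int × Int)) (init : Int × Int) :
    (PySem.List.pyRange 0 (rows.length : Int)).foldl
      (fun (st : Int × Int) k =>
        if (PySem.List.pyGetD rows k (0, 0)).2 < st.1 then ((PySem.List.pyGetD rows k (0, 0)).2, k) else st) init
    = (PySem.List.enumerate rows).foldl
      (fun (st : Int × Int) p => if p.2.2 < st.1 then (p.2.2, p.1) else st) init := by
  have h := PySem.List.enumerate_eq_map_pyRange rows ((0 : Int), (0 : Int))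
  rw [PySem.List.len_eq] at h
  rw [h, List.foldl_map]

-- ===== VERDICT (by name: the statement is the Claim_ definition above) =====
theorem get_row_to_swap_spec : Claim_equal_get_row_to_swap := by
  intro M s _ hpre
  obtain ⟨⟨hs0, hsn⟩, hlen⟩ := hpre
  unfold Spec_get_row_to_swap get_row_to_swap get_row_to_swap_alt
  simp only [get_lead_ind_eq]
  -- abbreviations (as plain terms; `set` would block syntactic rewrites)
  have hBfold : ∀ (l : List Int) (init : Int × Int),
      l.foldl (fun best i =>
        if lead_index (PySem.List.pyGetD M i []) < best.2
        then (i, lead_index (PySem.List.pyGetD M i [])) else best) init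
      = (l.map (fun i => (i, lead_index (PySem.List.pyGetD M i [])))).foldl pvStep init := by
    intro l
    induction l with
    | nil => intro init; rfl
    | cons x xs ih => intro init; simpa [pvStep] using ih _
  rw [hBfold]
  rw [PySem.List.foldl_append_ite
        (fun i : Int => lead_index (PySem.List.pyGetD M (i + s + 1) []) < lead_index (PySem.List.pyGetD M s []))
        (fun i : Int => (i + s + 1, lead_index (PySem.List.pyGetD M (i + s + 1) [])))]
  simp only [List.nil_append]
  -- the candidate list A builds is exactly the filtered pair list B's argmin runs over
  have hrows :
      (List.filter (fun x => decide (lead_index (PySem.List.pyGetD M (x + s + 1) []) < lead_index (PySem.List.pyGetD M s [])))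
          (PySem.List.pyRange 0 (↑M.length - (s + 1)))).map
        (fun i : Int => (i + s + 1, lead_index (PySem.List.pyGetD M (i + s + 1) [])))
      = (List.map (fun i => (i, lead_index (PySem.List.pyGetD M i []))) (PySem.List.pyRange (s + 1) ↑M.length)).filter
          (fun x => decide (x.2 < lead_index (PySem.List.pyGetD M s []))) := by
    rw [PySem.List.pyRange_one 0, PySem.List.pyRange_one (s + 1)]
    simp only [List.filter_map, List.map_map]
    have harg : ∀ k : ℕ, (0 : Int) + ↑k + s + 1 = s + 1 + ↑k := by intro k; ring
    have hm : (↑M.length - (s + 1) - 0).toNat = (↑M.length - (s + 1)).toNat := by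
      simp
    rw [hm]
    simp only [Function.comp_def, harg]
  rw [hrows]
  rw [foldl_step_filter (lead_index (PySem.List.pyGetD M s []))
        (List.map (fun i => (i, lead_index (PySem.List.pyGetD M i []))) (PySem.List.pyRange (s + 1) ↑M.length))
        (s, lead_index (PySem.List.pyGetD M s [])) (le_refl _)]
  by_cases hnil :
      (List.map (fun i => (i, lead_index (PySem.List.pyGetD M i []))) (PySem.List.pyRange (s + 1) ↑M.length)).filter
        (fun x => decide (x.2 < lead_index (PySem.List.pyGetD M s []))) = []
  · rw [hnil]; rw [if_pos rfl]; rfl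
  · rw [if_neg hnil]
    obtain ⟨hd, tl, hcons⟩ := List.exists_cons_of_ne_nil hnil
    -- hd survives the filter, so its lead index beats the start row's
    have hd_mem : hd ∈ (List.map (fun i => (i, lead_index (PySem.List.pyGetD M i []))) (PySem.List.pyRange (s + 1) ↑M.length)).filter
        (fun x => decide (x.2 < lead_index (PySem.List.pyGetD M s []))) := by
      rw [hcons]; exact List.mem_cons_self
    have hd_lt : hd.2 < lead_index (PySem.List.pyGetD M s []) :=
      of_decide_eq_true (List.mem_filter.mp hd_mem).2
    -- under Pre_, every lead index is at most len(M[0])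
    have hM0 : PySem.List.pyGetD M 0 [] = M.headD [] := by
      rw [PySem.List.pyGetD_zero]; cases M <;> simp
    have hle_L : lead_index (PySem.List.pyGetD M s []) ≤ ((PySem.List.pyGetD M 0 []).length : Int) := by
      calc lead_index (PySem.List.pyGetD M s []) ≤ ((PySem.List.pyGetD M s []).length : Int) :=
              lead_index_le _
        _ ≤ ((PySem.List.pyGetD M 0 []).length : Int) := by
              rw [hM0]; exact_mod_cast hlen
    have hd_lt_L : hd.2 < ((PySem.List.pyGetD M 0 []).length : Int) := lt_of_lt_of_le hd_lt hle_L
    rw [hcons, scan_to_enumerate, PySem.List.enumerate_cons]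
    simp only [List.foldl_cons, zero_add]
    rw [if_pos hd_lt_L]
    have hstep1 : pvStep (s, lead_index (PySem.List.pyGetD M s [])) hd = hd := by
      unfold pvStep; exact if_pos hd_lt
    rw [hstep1]
    have hinv := scan_inv ((0 : Int), (0 : Int)) tl [hd] 0 hd (le_refl 0)
      (by rw [List.singleton_append, PySem.List.pyGetD_zero_cons])
    simp only [List.singleton_append, List.length_cons, List.length_nil, Nat.cast_one,
      Nat.cast_ofNat, zero_add] at hinv
    exact congrArg Prod.fst hinv.2.1
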